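-- pv_equiv track=rewrite | github.com/geraldinepascal/FROGS | tools/affiliation_filters/affiliation_filters.py | get_tax_consensus
-- ===== SOURCE A (Python) =====
-- import copy
--
-- def get_tax_consensus( taxonomies ):
--     """
--     @summary: Returns a consensus taxonomy from list of taxonomies.
--     @param taxonomies: [list] The taxonomies to process. Each taxonomy is a list of rank taxon.
--     @return: [list] The consensus taxonomy. The ambiguous ranks are replaced by "Multi-affiliation".
--     @note:
--         taxonomies = [ ["Bacteria", "Proteobacteria", "Gamma Proteobacteria", "Enterobacteriales"],
--                        ["Bacteria", "Proteobacteria", "Beta Proteobacteria", "Methylophilales"] ]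
--         return = ["Bacteria", "Proteobacteria", "Multi-affiliation", "Multi-affiliation"]
--     """
--     consensus = list()
--     if len(taxonomies) != 0:
--         consensus = copy.copy(taxonomies[0])
--     for curr_taxonomy in taxonomies[1:]:
--         for rank, taxon in enumerate(curr_taxonomy):
--             if consensus[rank] != "Multi-affiliation" and consensus[rank] != taxon:
--                 consensus[rank] = "Multi-affiliation"
--     # Clean case with same taxon name in different branches:
--     #      with taxonomies = [["A", "B", "C"], ["A", "L", "C"]]
--     #      consensus is ["A", "Multi-affiliation", "C"] but must be ["A", "Multi-affiliation", "Multi-affiliation"]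
--     ancestor = ""
--     for rank in range(len(consensus)):
--         if ancestor == "Multi-affiliation":
--             consensus[rank] = "Multi-affiliation"
--         ancestor = consensus[rank]
--
--     if len(consensus) == 0 :
--         consensus = None
--     return consensus
-- ===== SOURCE B (Python) =====
-- def get_tax_consensus(taxonomies):
--     """Column-wise consensus: rank r is taxonomies[0][r] if every other
--     taxonomy reaching rank r agrees, else "Multi-affiliation"; once a rank
--     is ambiguous every deeper rank is too.  Returns None if there is no rank."""
--     if not taxonomies or not taxonomies[0]:
--         return None
--     head, rest = taxonomies[0], taxonomies[1:]
--     consensus = []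
--     poisoned = False
--     for rank, taxon in enumerate(head):
--         if not poisoned:
--             poisoned = (taxon == "Multi-affiliation"
--                         or any(rank < len(t) and t[rank] != taxon for t in rest))
--         consensus.append("Multi-affiliation" if poisoned else taxon)
--     return consensus
-- ===== Notes on version B (the rewrite author's own statement) =====
-- stated objective: simpler
-- what changed: B builds the consensus column by column in a single pass over taxonomies[0] with a 'poisoned' flag (each rank compares all other taxonomies at that rank and once a rank is ambiguous all deeper ranks become Multi-affiliation), instead of A's row-by-row in-place mutation of a copied list followed by a separate ancestor-based cleanup pass.
import Mathlib
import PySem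

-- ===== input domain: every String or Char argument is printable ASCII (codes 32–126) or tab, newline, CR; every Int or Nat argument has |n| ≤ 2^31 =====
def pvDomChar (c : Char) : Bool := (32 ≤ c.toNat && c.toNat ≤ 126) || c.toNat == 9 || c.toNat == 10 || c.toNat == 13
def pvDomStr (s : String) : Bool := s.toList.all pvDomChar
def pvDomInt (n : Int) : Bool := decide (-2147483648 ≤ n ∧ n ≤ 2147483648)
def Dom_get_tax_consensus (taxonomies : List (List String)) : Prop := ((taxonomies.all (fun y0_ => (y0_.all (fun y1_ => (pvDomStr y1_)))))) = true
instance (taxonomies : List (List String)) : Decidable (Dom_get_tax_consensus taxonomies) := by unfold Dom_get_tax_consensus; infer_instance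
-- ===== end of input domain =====

-- B computes the consensus column by column in one pass with a single poisoned flag instead of
-- A's in-place row-by-row mutation followed by a cleanup pass; same values, objective: simpler.

-- ===== PORT A =====
-- inner loop body: if consensus[rank] != "Multi-affiliation" and consensus[rank] != taxon:
--                      consensus[rank] = "Multi-affiliation"
-- (pyGetD/pySetD are exact for the in-range indices Pre_ guarantees; outside Pre_ Python raises IndexError)
def pvAStep (cons : List String) (rt : Int × String) : List String :=
  if PySem.List.pyGetD cons rt.1 "" ≠ "Multi-affiliation" ∧ PySem.List.pyGetD cons rt.1 "" ≠ rt.2 then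
    PySem.List.pySetD cons rt.1 "Multi-affiliation"
  else cons

-- cleanup loop body: if ancestor == "Multi-affiliation": consensus[rank] = "Multi-affiliation"
--                    ancestor = consensus[rank]
def pvClean (st : List String × String) (rank : Int) : List String × String :=
  let cons := if st.2 = "Multi-affiliation" then PySem.List.pySetD st.1 rank "Multi-affiliation" else st.1
  (cons, PySem.List.pyGetD cons rank "")

def get_tax_consensus (taxonomies : List (List String)) : Option (List String) :=
  -- consensus = list(); if len(taxonomies) != 0: consensus = copy.copy(taxonomies[0])
  let consensus : List String := if taxonomies.length ≠ 0 then PySem.List.pyGetD taxonomies 0 [] else []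
  -- for curr_taxonomy in taxonomies[1:]: for rank, taxon in enumerate(curr_taxonomy): …
  let consensus := (PySem.List.slice taxonomies (some (1 : Int)) none).foldl
      (fun cons curr => (PySem.List.enumerate curr).foldl pvAStep cons) consensus
  -- ancestor = ""; for rank in range(len(consensus)): …
  let consensus := ((PySem.List.pyRange 0 (consensus.length : Int) 1).foldl pvClean (consensus, "")).1
  -- if len(consensus) == 0: consensus = None
  if consensus.length = 0 then none else some consensus

-- ===== PORT B =====
-- loop body of B: poisoned = poisoned or taxon == "Multi-affiliation" or any(...); append
def pvBStep (rest : List (List String)) (st : List String × Bool) (rt : Int × String) : List String × Bool :=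
  let poisoned := if !st.2 then
      (rt.2 == "Multi-affiliation")
        || rest.any (fun u => decide (rt.1 < (u.length : Int)) && (PySem.List.pyGetD u rt.1 "" != rt.2))
    else st.2
  (st.1 ++ [if poisoned then "Multi-affiliation" else rt.2], poisoned)

def get_tax_consensus_alt (taxonomies : List (List String)) : Option (List String) :=
  match taxonomies with
  | [] => none
  | head :: rest =>
    if head = [] then none
    else some (((PySem.List.enumerate head).foldl (pvBStep rest) ([], false)).1)

-- ===== PRECONDITION & SPEC =====
-- Pre_ excludes exactly the inputs on which A raises IndexError: a later taxonomy longer than taxonomies[0].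
def Pre_get_tax_consensus (taxonomies : List (List String)) : Prop :=
  ∀ t ∈ taxonomies.tail, t.length ≤ (taxonomies.headD []).length
instance (taxonomies : List (List String)) : Decidable (Pre_get_tax_consensus taxonomies) := by unfold Pre_get_tax_consensus; infer_instance
def pvWitness_get_tax_consensus : List (List String) :=
  [["Bacteria", "Proteobacteria", "Gamma"], ["Bacteria", "Proteobacteria", "Beta"]]


def Spec_get_tax_consensus (taxonomies : List (List String)) (out : Option (List String)) : Prop := out = get_tax_consensus_alt taxonomies
instance (taxonomies : List (List String)) (out : Option (List String)) : Decidable (Spec_get_tax_consensus taxonomies out) := by unfold Spec_get_tax_consensus; infer_instance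

-- ===== CLAIM (what is proved, stated in full; the proofs are below) =====
def Claim_equal_get_tax_consensus : Prop := ∀ (taxonomies : List (List String)), Dom_get_tax_consensus taxonomies → Pre_get_tax_consensus taxonomies → Spec_get_tax_consensus taxonomies (get_tax_consensus taxonomies)

-- ===== LEMMAS AND PROOFS =====
lemma pvA1 (curr : List String) : ∀ (s : Nat) (cons : List String),
    s + curr.length ≤ cons.length → ∀ (i : Nat),
    ((PySem.List.enumerate curr (s : Int)).foldl pvAStep cons).getD i "" =
      if s ≤ i ∧ i < s + curr.length ∧ cons.getD i "" ≠ "Multi-affiliation" ∧ curr.getD (i - s) "" ≠ cons.getD i "" then "Multi-affiliation"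
      else cons.getD i "" := by
  induction curr with
  | nil =>
    intro s cons _ i
    rw [PySem.List.enumerate_nil, if_neg (by rintro ⟨h1, h2, -⟩; simp only [List.length_nil] at h2; omega)]
    rfl
  | cons x tl ih =>
    intro s cons hlen i
    simp only [List.length_cons] at hlen ⊢
    have hs : s < cons.length := by omega
    rw [PySem.List.enumerate_cons, List.foldl_cons]
    have hcast : (s : Int) + 1 = ((s + 1 : Nat) : Int) := by push_cast; ring
    rw [hcast]
    have hstep : pvAStep cons ((s : Int), x) =
        if cons.getD s "" ≠ "Multi-affiliation" ∧ cons.getD s "" ≠ x then cons.set s "Multi-affiliation" else cons := by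
      simp [pvAStep]
    rw [hstep]
    have hset : ∀ j : Nat, (cons.set s "Multi-affiliation").getD j "" =
        if j = s then "Multi-affiliation" else cons.getD j "" := by
      intro j
      rw [List.getD_eq_getElem?_getD, List.getD_eq_getElem?_getD, List.getElem?_set]
      by_cases hj : j = s
      · simp [hj, hs]
      · rw [if_neg (fun h => hj h.symm)]
        exact (if_neg hj).symm
    by_cases hA : cons.getD s "" ≠ "Multi-affiliation" ∧ cons.getD s "" ≠ x
    · rw [if_pos hA, ih (s + 1) _ (by simp only [List.length_set]; omega) i]
      simp only [hset]
      by_cases heq : i = s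
      · subst heq
        rw [if_pos rfl, if_neg (by rintro ⟨h1, -⟩; omega),
          if_pos ⟨le_refl _, by omega, hA.1, by
            simp only [Nat.sub_self, List.getD_cons_zero]; exact Ne.symm hA.2⟩]
      · simp only [if_neg heq]
        rcases Nat.lt_trichotomy i s with hlt | heq' | hgt
        · rw [if_neg (by rintro ⟨h1, -⟩; omega), if_neg (by rintro ⟨h1, -⟩; omega)]
        · exact absurd heq' heq
        · have hgd : (x :: tl).getD (i - s) "" = tl.getD (i - (s + 1)) "" := by
            have h : i - s = (i - (s + 1)) + 1 := by omega
            rw [h, List.getD_cons_succ]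
          rw [hgd]
          by_cases hc : s + 1 ≤ i ∧ i < s + 1 + tl.length ∧ cons.getD i "" ≠ "Multi-affiliation" ∧ tl.getD (i - (s + 1)) "" ≠ cons.getD i ""
          · rw [if_pos hc, if_pos ⟨by omega, by omega, hc.2.2⟩]
          · rw [if_neg hc, if_neg (by rintro ⟨h1, h2, h3, h4⟩; exact hc ⟨by omega, by omega, h3, h4⟩)]
    · rw [if_neg hA, ih (s + 1) _ (by omega) i]
      rcases Nat.lt_trichotomy i s with hlt | heq | hgt
      · rw [if_neg (by rintro ⟨h1, -⟩; omega), if_neg (by rintro ⟨h1, -⟩; omega)]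
      · subst heq
        rw [if_neg (by rintro ⟨h1, -⟩; omega), if_neg (by
          rintro ⟨-, -, h3, h4⟩
          simp only [Nat.sub_self, List.getD_cons_zero] at h4
          rw [Classical.not_and_iff_not_or_not] at hA
          rcases hA with h | h
          · exact h3 (Classical.not_not.mp h)
          · exact h4 (Classical.not_not.mp h).symm)]
      · have hgd : (x :: tl).getD (i - s) "" = tl.getD (i - (s + 1)) "" := by
          have h : i - s = (i - (s + 1)) + 1 := by omega
          rw [h, List.getD_cons_succ]
        rw [hgd]
        by_cases hc : s + 1 ≤ i ∧ i < s + 1 + tl.length ∧ cons.getD i "" ≠ "Multi-affiliation" ∧ tl.getD (i - (s + 1)) "" ≠ cons.getD i ""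
        · rw [if_pos hc, if_pos ⟨by omega, by omega, hc.2.2⟩]
        · rw [if_neg hc, if_neg (by rintro ⟨h1, h2, h3, h4⟩; exact hc ⟨by omega, by omega, h3, h4⟩)]

lemma pvA1len (curr : List String) : ∀ (s : Int) (cons : List String),
    ((PySem.List.enumerate curr s).foldl pvAStep cons).length = cons.length := by
  induction curr with
  | nil => intro s cons; rw [PySem.List.enumerate_nil]; rfl
  | cons x tl ih =>
    intro s cons
    rw [PySem.List.enumerate_cons, List.foldl_cons, ih]
    unfold pvAStep
    split
    · exact PySem.List.length_pySetD _ _ _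
    · rfl

def pvBadB (r : List (List String)) (t : List String) (s i : Nat) : Bool :=
  (t.getD i "" == "Multi-affiliation")
    || r.any (fun u => decide (s + i < u.length) && (u.getD (s + i) "" != t.getD i ""))

def pvColGet (h : List String) (r : List (List String)) (i : Nat) : String :=
  if pvBadB r h 0 i then "Multi-affiliation" else h.getD i ""

lemma pvBadB_of_M (r : List (List String)) (t : List String) (s i : Nat)
    (hM : t.getD i "" = "Multi-affiliation") : pvBadB r t s i = true := by
  unfold pvBadB
  rw [hM]
  simp

lemma pvColGet_eq_M (h : List String) (r : List (List String)) (i : Nat) :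
    (pvColGet h r i = "Multi-affiliation") ↔ pvBadB r h 0 i = true := by
  unfold pvColGet
  by_cases hb : pvBadB r h 0 i = true
  · simp [hb]
  · simp only [if_neg hb]
    constructor
    · intro hM
      exact absurd (pvBadB_of_M r h 0 i hM) hb
    · intro hc; exact absurd hc hb

lemma pvA2 (r : List (List String)) (h : List String) (hr : ∀ t ∈ r, t.length ≤ h.length) :
    (r.foldl (fun cons curr => (PySem.List.enumerate curr 0).foldl pvAStep cons) h).length = h.length ∧
    ∀ i : Nat, (r.foldl (fun cons curr => (PySem.List.enumerate curr 0).foldl pvAStep cons) h).getD i "" = pvColGet h r i := by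
  induction r using List.reverseRecOn with
  | nil =>
    refine ⟨rfl, fun i => ?_⟩
    unfold pvColGet pvBadB
    by_cases hM : h.getD i "" = "Multi-affiliation"
    · simp
    · simp
  | append_singleton r curr ih =>
    have hr' : ∀ t ∈ r, t.length ≤ h.length := fun t ht => hr t (List.mem_append_left _ ht)
    have hcurr : curr.length ≤ h.length := hr curr (List.mem_append_right _ (List.mem_singleton.mpr rfl))
    obtain ⟨ihlen, ihget⟩ := ih hr'
    rw [List.foldl_append]
    set c := r.foldl (fun cons curr => (PySem.List.enumerate curr 0).foldl pvAStep cons) h with hc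
    simp only [List.foldl_cons, List.foldl_nil]
    have hA1 := pvA1 curr 0 c (by omega)
    simp only [Nat.cast_zero, Nat.zero_add, Nat.sub_zero, Nat.zero_le, true_and] at hA1
    have hlen1 := pvA1len curr 0 c
    refine ⟨by rw [hlen1, ihlen], fun i => ?_⟩
    rw [hA1 i, ihget i]
    have hsplit : pvBadB (r ++ [curr]) h 0 i =
        (pvBadB r h 0 i || (decide (i < curr.length) && (curr.getD i "" != h.getD i ""))) := by
      unfold pvBadB
      simp only [List.any_append, List.any_cons, List.any_nil, Bool.or_false, Nat.zero_add]
      cases hx : (h.getD i "" == "Multi-affiliation") <;> cases hy : r.any (fun u => decide (i < u.length) && (u.getD i "" != h.getD i "")) <;> simp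
    by_cases hb : pvBadB r h 0 i = true
    · have hcM : pvColGet h r i = "Multi-affiliation" := (pvColGet_eq_M h r i).mpr hb
      rw [if_neg (by rintro ⟨-, h2, -⟩; exact h2 hcM)]
      unfold pvColGet
      rw [hsplit, hb]
      simp
    · have hbf : pvBadB r h 0 i = false := by simpa using hb
      have hcv : pvColGet h r i = h.getD i "" := by unfold pvColGet; rw [hbf]; rfl
      have hhM : h.getD i "" ≠ "Multi-affiliation" := by
        intro hM
        exact hb (pvBadB_of_M r h 0 i hM)
      rw [hcv]
      unfold pvColGet
      rw [hsplit, hbf, Bool.false_or]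
      by_cases hlt : i < curr.length
      · by_cases hne : curr.getD i "" = h.getD i ""
        · rw [if_neg (by rintro ⟨-, -, h4⟩; exact h4 hne),
            if_neg (by simp only [Bool.and_eq_true, bne_iff_ne, decide_eq_true_eq]; rintro ⟨-, h4⟩; exact h4 hne)]
        · rw [if_pos ⟨hlt, hhM, hne⟩,
            if_pos (by simp only [Bool.and_eq_true, bne_iff_ne, decide_eq_true_eq]; exact ⟨hlt, hne⟩)]
      · rw [if_neg (by rintro ⟨h1, -⟩; exact hlt h1),
          if_neg (by simp only [Bool.and_eq_true, decide_eq_true_eq]; rintro ⟨h1, -⟩; exact hlt h1)]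

lemma pvGetDSet (l : List String) (s : Nat) (hs : s < l.length) (v : String) (j : Nat) :
    (l.set s v).getD j "" = if j = s then v else l.getD j "" := by
  rw [List.getD_eq_getElem?_getD, List.getD_eq_getElem?_getD, List.getElem?_set]
  by_cases hj : j = s
  · simp [hj, hs]
  · rw [if_neg (fun h => hj h.symm)]
    exact (if_neg hj).symm

def pvAnyM (c : List String) (n : Nat) : Bool :=
  (List.range n).any (fun j => c.getD j "" == "Multi-affiliation")

lemma pvAnyM_succ (c : List String) (n : Nat) :
    pvAnyM c (n + 1) = (pvAnyM c n || (c.getD n "" == "Multi-affiliation")) := by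
  unfold pvAnyM
  rw [List.range_succ, List.any_append, List.any_cons, List.any_nil, Bool.or_false]


lemma pvA3 : ∀ (k : Nat) (c : List String), k ≤ c.length →
    (((PySem.List.pyRange 0 (k : Int) 1).foldl pvClean (c, "")).1.length = c.length) ∧
    (∀ i : Nat, ((PySem.List.pyRange 0 (k : Int) 1).foldl pvClean (c, "")).1.getD i "" =
      if i < k ∧ pvAnyM c (i + 1) = true then "Multi-affiliation" else c.getD i "") ∧
    (((PySem.List.pyRange 0 (k : Int) 1).foldl pvClean (c, "")).2 =
      if k = 0 then "" else (if pvAnyM c k = true then "Multi-affiliation" else c.getD (k - 1) "")) := by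
  intro k
  induction k with
  | zero =>
    intro c _
    rw [show ((0 : Nat) : Int) = 0 from rfl, PySem.List.pyRange_one_eq_nil (le_refl 0)]
    refine ⟨rfl, fun i => ?_, rfl⟩
    rw [if_neg (by rintro ⟨h1, -⟩; omega)]
    rfl
  | succ k ih =>
    intro c hk
    obtain ⟨ihlen, ihget, ihanc⟩ := ih c (by omega)
    have hkc : k < c.length := by omega
    have hcast : ((k + 1 : Nat) : Int) = (k : Int) + 1 := by push_cast; ring
    rw [hcast, PySem.List.pyRange_one_succ_right (by positivity), List.foldl_append,
      List.foldl_cons, List.foldl_nil]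
    set st := (PySem.List.pyRange 0 (k : Int) 1).foldl pvClean (c, "") with hst
    have hancM : st.2 = "Multi-affiliation" ↔ pvAnyM c k = true := by
      rw [ihanc]
      by_cases hk0 : k = 0
      · subst hk0
        simp [pvAnyM]
      · rw [if_neg hk0]
        by_cases hany : pvAnyM c k = true
        · simp [hany]
        · rw [if_neg hany]
          constructor
          · intro hM
            exfalso
            apply hany
            unfold pvAnyM
            rw [List.any_eq_true]
            exact ⟨k - 1, by rw [List.mem_range]; omega, by rw [hM]; rfl⟩
          · intro h; exact absurd h hany
    unfold pvClean
    by_cases hanc : st.2 = "Multi-affiliation"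
    · have hany : pvAnyM c k = true := hancM.mp hanc
      rw [if_pos hanc]
      simp only [PySem.List.pySetD_natCast, PySem.List.pyGetD_natCast]
      have hlen : (st.1.set k "Multi-affiliation").length = c.length := by
        rw [List.length_set, ihlen]
      have hget : ∀ j : Nat, (st.1.set k "Multi-affiliation").getD j "" =
          if j = k then "Multi-affiliation" else st.1.getD j "" :=
        pvGetDSet st.1 k (by omega) "Multi-affiliation"
      refine ⟨hlen, fun i => ?_, ?_⟩
      · rw [hget i]
        by_cases hik : i = k
        · subst hik
          rw [if_pos rfl, if_pos ⟨by omega, by rw [pvAnyM_succ, hany]; rfl⟩]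
        · rw [if_neg hik, ihget i]
          by_cases hc : i < k ∧ pvAnyM c (i + 1) = true
          · rw [if_pos hc, if_pos ⟨by omega, hc.2⟩]
          · rw [if_neg hc, if_neg (by rintro ⟨h1, h2⟩; exact hc ⟨by omega, h2⟩)]
      · rw [hget k, if_pos rfl, if_neg (by omega), if_pos (by rw [pvAnyM_succ, hany]; rfl)]
    · have hany : pvAnyM c k = false := by
        rcases Bool.eq_false_or_eq_true (pvAnyM c k) with h | h
        · exact absurd (hancM.mpr h) hanc
        · exact h
      rw [if_neg hanc]
      simp only [PySem.List.pyGetD_natCast]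
      refine ⟨ihlen, fun i => ?_, ?_⟩
      · rw [ihget i]
        by_cases hik : i = k
        · subst hik
          rw [if_neg (by rintro ⟨h1, -⟩; omega)]
          by_cases hM : c.getD i "" = "Multi-affiliation"
          · rw [if_pos ⟨by omega, by rw [pvAnyM_succ, hM]; simp⟩, hM]
          · rw [if_neg (by
              rintro ⟨-, h2⟩
              rw [pvAnyM_succ, hany, Bool.false_or] at h2
              exact hM (by simpa using h2))]
        · by_cases hc : i < k ∧ pvAnyM c (i + 1) = true
          · rw [if_pos hc, if_pos ⟨by omega, hc.2⟩]
          · rw [if_neg hc, if_neg (by rintro ⟨h1, h2⟩; exact hc ⟨by omega, h2⟩)]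
      · rw [ihget k, if_neg (by rintro ⟨h1, -⟩; omega), if_neg (by omega)]
        simp only [Nat.add_sub_cancel]
        rw [pvAnyM_succ, hany, Bool.false_or]
        by_cases hM : c.getD k "" = "Multi-affiliation"
        · rw [if_pos (by rw [hM]; rfl), hM]
        · rw [if_neg (fun h => hM (by simpa using h))]

def pvBspec (r : List (List String)) : List String → Nat → Bool → List String
  | [], _, _ => []
  | x :: tl, s, p =>
    let p' := if !p then (x == "Multi-affiliation") || r.any (fun t => decide (s < t.length) && (t.getD s "" != x)) else p
    (if p' then "Multi-affiliation" else x) :: pvBspec r tl (s + 1) p'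

lemma pvB1 (r : List (List String)) : ∀ (t : List String) (s : Nat) (out : List String) (p : Bool),
    ((PySem.List.enumerate t (s : Int)).foldl (pvBStep r) (out, p)).1 = out ++ pvBspec r t s p := by
  intro t
  induction t with
  | nil =>
    intro s out p
    rw [PySem.List.enumerate_nil]
    simp [pvBspec]
  | cons x tl ih =>
    intro s out p
    rw [PySem.List.enumerate_cons, List.foldl_cons,
      show (s : Int) + 1 = ((s + 1 : Nat) : Int) by push_cast; ring]
    simp only [pvBStep]
    have harg : ∀ u : List String,
        (decide ((s : Int) < (u.length : Int)) && (PySem.List.pyGetD u (s : Int) "" != x)) =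
        (decide (s < u.length) && (u.getD s "" != x)) := by
      intro u
      simp only [PySem.List.pyGetD_natCast, Nat.cast_lt]
    simp only [harg]
    rw [ih]
    simp only [pvBspec, List.append_assoc, List.singleton_append]

lemma pvB2len (r : List (List String)) : ∀ (t : List String) (s : Nat) (p : Bool),
    (pvBspec r t s p).length = t.length := by
  intro t
  induction t with
  | nil => intro s p; rfl
  | cons x tl ih =>
    intro s p
    simp only [pvBspec, List.length_cons, ih]

lemma pvBadB_shift (r : List (List String)) (x : String) (tl : List String) (s j : Nat) :
    pvBadB r tl (s + 1) j = pvBadB r (x :: tl) s (j + 1) := by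
  unfold pvBadB
  rw [List.getD_cons_succ, show s + 1 + j = s + (j + 1) by omega]

lemma pvB2 (r : List (List String)) : ∀ (t : List String) (s : Nat) (p : Bool) (i : Nat),
    (pvBspec r t s p).getD i "" =
      if i < t.length ∧ (p || (List.range (i + 1)).any (fun j => pvBadB r t s j)) = true
      then "Multi-affiliation" else t.getD i "" := by
  intro t
  induction t with
  | nil =>
    intro s p i
    rw [if_neg (by rintro ⟨h1, -⟩; simp only [List.length_nil] at h1; omega)]
    rfl
  | cons x tl ih =>
    intro s p i
    have hp' : (if !p then (x == "Multi-affiliation") || r.any (fun u => decide (s < u.length) && (u.getD s "" != x)) else p)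
        = (p || pvBadB r (x :: tl) s 0) := by
      unfold pvBadB
      rw [List.getD_cons_zero, Nat.add_zero]
      cases p <;> rfl
    cases i with
    | zero =>
      simp only [pvBspec, List.getD_cons_zero, hp']
      rw [show List.range 1 = [0] from rfl]
      simp only [List.any_cons, List.any_nil, Bool.or_false]
      by_cases hc : (p || pvBadB r (x :: tl) s 0) = true
      · rw [if_pos hc, if_pos ⟨by simp, hc⟩]
      · rw [if_neg hc, if_neg (by rintro ⟨-, h2⟩; exact hc h2)]
    | succ i =>
      simp only [pvBspec, List.getD_cons_succ, List.length_cons, hp']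
      rw [ih (s + 1) (p || pvBadB r (x :: tl) s 0) i]
      have hsplit : (List.range (i + 1 + 1)).any (fun j => pvBadB r (x :: tl) s j)
          = (pvBadB r (x :: tl) s 0 || (List.range (i + 1)).any (fun j => pvBadB r tl (s + 1) j)) := by
        rw [List.range_succ_eq_map, List.any_cons, List.any_map]
        have hfun : ((fun j => pvBadB r (x :: tl) s j) ∘ Nat.succ) = fun j => pvBadB r tl (s + 1) j := by
          funext j
          simp only [Function.comp_apply, Nat.succ_eq_add_one]
          exact (pvBadB_shift r x tl s j).symm
        rw [hfun]
      rw [hsplit]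
      by_cases hi : i < tl.length
      · by_cases hb : (p || (pvBadB r (x :: tl) s 0 || (List.range (i + 1)).any (fun j => pvBadB r tl (s + 1) j))) = true
        · rw [if_pos ⟨by omega, by rw [Bool.or_assoc]; exact hb⟩, if_pos ⟨by omega, hb⟩]
        · rw [if_neg (by rintro ⟨-, h2⟩; exact hb (by rw [Bool.or_assoc] at h2; exact h2)),
            if_neg (by rintro ⟨-, h2⟩; exact hb h2)]
      · rw [if_neg (by rintro ⟨h1, -⟩; omega), if_neg (by rintro ⟨h1, -⟩; omega)]

-- ===== VERDICT (by name: the statement is the Claim_ definition above) =====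
theorem get_tax_consensus_spec : Claim_equal_get_tax_consensus := by
  intro txs _ hpre
  unfold Spec_get_tax_consensus
  cases txs with
  | nil => rfl
  | cons h r =>
    have hr : ∀ t ∈ r, t.length ≤ h.length := by
      intro t ht
      simpa using hpre t (by simpa using ht)
    simp only [get_tax_consensus, get_tax_consensus_alt]
    rw [if_pos (show ¬(h :: r).length = 0 by simp), PySem.List.pyGetD_zero_cons,
      show PySem.List.slice (h :: r) (some (1 : Int)) none = r by
        rw [PySem.List.slice_from (h :: r) (by norm_num : (0:Int) ≤ 1)]; rfl]
    obtain ⟨hlen2, hget2⟩ := pvA2 r h hr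
    set c2 := r.foldl (fun cons curr => (PySem.List.enumerate curr).foldl pvAStep cons) h with hc2
    obtain ⟨hlen3, hget3, -⟩ := pvA3 c2.length c2 (le_refl _)
    by_cases hh : h = []
    · subst hh
      have hc2nil : c2 = [] := List.length_eq_zero_iff.mp (by rw [hlen2]; rfl)
      rw [hc2nil]
      rw [show ((List.length ([] : List String) : Nat) : Int) = 0 from rfl,
        PySem.List.pyRange_one_eq_nil (le_refl 0)]
      rfl
    · rw [if_neg hh]
      have hb1 := pvB1 r h 0 [] false
      simp only [Nat.cast_zero, List.nil_append] at hb1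
      rw [hb1]
      have hlen4 : (((PySem.List.pyRange 0 (c2.length : Int) 1).foldl pvClean (c2, "")).1).length = h.length := by
        rw [hlen3, hlen2]
      rw [if_neg (by rw [hlen4]; simpa using fun hz => hh (List.length_eq_zero_iff.mp hz))]
      congr 1
      have hbeq : ∀ j : Nat, (c2.getD j "" == "Multi-affiliation") = pvBadB r h 0 j := by
        intro j
        rw [hget2 j]
        by_cases hb : pvBadB r h 0 j = true
        · rw [hb, (pvColGet_eq_M h r j).mpr hb]
          rfl
        · have hbf : pvBadB r h 0 j = false := eq_false_of_ne_true hb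
          rw [hbf]
          have hne : pvColGet h r j ≠ "Multi-affiliation" := fun hM => hb ((pvColGet_eq_M h r j).mp hM)
          exact beq_eq_false_iff_ne.mpr hne
      apply List.ext_getElem
      · rw [hlen4, pvB2len]
      · intro i hi1 hi2
        have hih : i < h.length := by rw [hlen4] at hi1; exact hi1
        rw [← List.getD_eq_getElem _ "" hi1, ← List.getD_eq_getElem _ "" hi2]
        rw [hget3 i, pvB2 r h 0 false i]
        have hany : pvAnyM c2 (i + 1) = (List.range (i + 1)).any (fun j => pvBadB r h 0 j) := by
          unfold pvAnyM
          simp only [hbeq]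
        rw [hany]
        simp only [Bool.false_or]
        by_cases hc : (List.range (i + 1)).any (fun j => pvBadB r h 0 j) = true
        · rw [if_pos ⟨by omega, hc⟩, if_pos ⟨hih, hc⟩]
        · rw [if_neg (by rintro ⟨-, h2⟩; exact hc h2), if_neg (by rintro ⟨-, h2⟩; exact hc h2),
            hget2 i]
          unfold pvColGet
          rw [show pvBadB r h 0 i = false by
            rcases Bool.eq_false_or_eq_true (pvBadB r h 0 i) with hbt | hbf
            · exact absurd (by
                rw [List.any_eq_true]
                exact ⟨i, List.mem_range.mpr (by omega), hbt⟩) hc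
            · exact hbf]
          rfl
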